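-- pv_equiv track=rewrite | github.com/limkokhole/pyntest | pyntest_tool.py | nsInSameNetwork
-- ===== SOURCE A (Python) =====
-- def nsInSameNetwork(nslist):
--     """
--     Comprueba que todos los servidores de nombres se encuentran en redes distintas.
--
--     :param nslist (list):     una lista con las ips de todos los servidores de nombres.
--     :return: sameNet (bool): devuelve True si hay varios NS en la misma subred, False
--                              si todos los NS se encuentran en subredes diferentes.
--     """
--     networks = []
--     for ip in nslist:
--         net = ip.split('.')
--         net = net[0] + '.' + net[1] + '.' + net[2]
--         networks.append(net)
--
--     sameNet = False
--     if len(networks) != len(set(networks)):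
--         sameNet = True
--
--     return sameNet
-- ===== SOURCE B (Python) =====
-- def nsInSameNetwork(nslist):
--     s = sorted(f"{net[0]}.{net[1]}.{net[2]}"
--                for net in (ip.split('.') for ip in nslist))
--     return any(x == y for x, y in zip(s, s[1:]))
-- ===== Notes on version B (the rewrite author's own statement) =====
-- stated objective: alternative
-- what changed: B replaces A's set-cardinality duplicate test (len(list) != len(set(list))) by sorting the /24 prefixes and scanning adjacent pairs for an equal neighbour, building each prefix with an f-string in a generator instead of A's explicit accumulation loop.
import Mathlib
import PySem

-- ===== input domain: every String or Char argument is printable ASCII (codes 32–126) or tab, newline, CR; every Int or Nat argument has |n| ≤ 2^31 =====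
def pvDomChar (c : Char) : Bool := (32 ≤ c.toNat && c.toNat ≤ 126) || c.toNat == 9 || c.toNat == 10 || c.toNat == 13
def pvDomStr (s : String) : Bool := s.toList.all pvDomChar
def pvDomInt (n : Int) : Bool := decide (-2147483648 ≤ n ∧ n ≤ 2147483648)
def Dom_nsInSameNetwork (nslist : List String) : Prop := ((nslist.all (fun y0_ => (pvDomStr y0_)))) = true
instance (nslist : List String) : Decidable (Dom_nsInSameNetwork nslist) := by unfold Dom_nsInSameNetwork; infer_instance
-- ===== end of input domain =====

-- B replaces A's set-cardinality duplicate test by sort + adjacent-pair scan (alternative decomposition, no speed claim).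

-- ===== PORT A =====
-- ip.split('.')  (sep "." ≠ "", so split? is always some; getD [] is never taken)
def pvSplitDot (ip : String) : List String := (PySem.Str.split? ip ".").getD []

-- net[0] + '.' + net[1] + '.' + net[2]; pyGetD stands for net[k], exact under Pre_ (index in range)
def nsInSameNetwork (nslist : List String) : Bool :=
  let networks := nslist.foldl (fun acc ip =>
    let net := pvSplitDot ip
    acc ++ [PySem.List.pyGetD net 0 "" ++ "." ++ PySem.List.pyGetD net 1 "" ++ "." ++ PySem.List.pyGetD net 2 ""]) []
  let sameNet := false
  let sameNet := if PySem.List.len networks ≠ PySem.List.len (PySem.Set.ofList networks) then true else sameNet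
  sameNet

-- ===== PORT B =====
-- f"{net[0]}.{net[1]}.{net[2]}": the f-string interpolates the three parts around literal dots,
-- which is exactly this concatenation; pyGetD stands for net[k], exact under Pre_ (index in range)
def pvPrefix3 (ip : String) : String :=
  let net := pvSplitDot ip
  PySem.List.pyGetD net 0 "" ++ "." ++ PySem.List.pyGetD net 1 "" ++ "." ++ PySem.List.pyGetD net 2 ""

def nsInSameNetwork_alt (nslist : List String) : Bool :=
  let prefixes := nslist.map pvPrefix3
  let s := PySem.List.sorted prefixes (fun x => x) false
  (s.zip (PySem.List.slice s (some 1) none)).any (fun p => p.1 == p.2)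

-- ===== PRECONDITION & SPEC =====
-- Pre_ excludes exactly the inputs where A raises IndexError: some ip splits into fewer than 3 parts.
def Pre_nsInSameNetwork (nslist : List String) : Prop := ∀ ip ∈ nslist, 3 ≤ (pvSplitDot ip).length
instance (nslist : List String) : Decidable (Pre_nsInSameNetwork nslist) := by unfold Pre_nsInSameNetwork; infer_instance

def pvWitness_nsInSameNetwork : List String := ["1.2.3.4", "1.2.3.7"]

def Spec_nsInSameNetwork (nslist : List String) (out : Bool) : Prop := out = nsInSameNetwork_alt nslist
instance (nslist : List String) (out : Bool) : Decidable (Spec_nsInSameNetwork nslist out) := by unfold Spec_nsInSameNetwork; infer_instance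

-- ===== CLAIM (what is proved, stated in full; the proofs are below) =====
def Claim_equal_nsInSameNetwork : Prop := ∀ (nslist : List String), Dom_nsInSameNetwork nslist → Pre_nsInSameNetwork nslist → Spec_nsInSameNetwork nslist (nsInSameNetwork nslist)

-- ===== LEMMAS AND PROOFS =====

lemma ofList_sublist (l : List String) : (PySem.Set.ofList l).Sublist l := by
  induction l with
  | nil => simp [PySem.Set.ofList_nil]
  | cons x xs ih =>
    rw [PySem.Set.ofList_cons]
    refine List.Sublist.cons₂ x (List.Sublist.trans ?_ ih)
    simp [PySem.Set.discard]

lemma ofList_length_iff (l : List String) : (PySem.Set.ofList l).length = l.length ↔ l.Nodup := by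
  constructor
  · intro h
    have := (ofList_sublist l).eq_of_length h
    rw [← this]
    exact PySem.Set.nodup_ofList l
  · intro h
    rw [PySem.Set.ofList_eq_self_of_nodup l h]

-- on a ≤-sorted list, "no equal adjacent pair" is exactly Nodup
lemma adj_scan_sorted (s : List String) (hs : s.Pairwise (· ≤ ·)) :
    ((s.zip s.tail).any (fun p => p.1 == p.2) = false) ↔ s.Nodup := by
  induction s with
  | nil => simp
  | cons a t ih =>
    cases t with
    | nil => simp
    | cons b u =>
      have hpt : (b :: u).Pairwise (· ≤ ·) := hs.tail
      have hab : a ≤ b := (List.pairwise_cons.mp hs).1 b (by simp)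
      have hau : ∀ y ∈ u, b ≤ y := fun y hy => (List.pairwise_cons.mp hpt).1 y hy
      by_cases hEq : a = b
      · subst hEq
        constructor
        · intro hfalse; exfalso; simp [List.zip] at hfalse
        · intro hnd; exfalso; exact (List.nodup_cons.mp hnd).1 (by simp)
      · have hmem : a ∉ b :: u := by
          intro hm
          rcases List.mem_cons.mp hm with h | h
          · exact hEq h
          · exact hEq (le_antisymm hab (hau a h))
        have key : (((a :: b :: u).zip (a :: b :: u).tail).any (fun p => p.1 == p.2))
            = (((b :: u).zip (b :: u).tail).any (fun p => p.1 == p.2)) := by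
          simp [List.zip, hEq]
        rw [key, ih hpt]
        exact ⟨fun h2 => List.nodup_cons.mpr ⟨hmem, h2⟩, fun h => (List.nodup_cons.mp h).2⟩

-- core: A's set-cardinality test equals B's sort-and-scan test, for any list
lemma dup_test_eq (l : List String) :
    (if PySem.List.len l ≠ PySem.List.len (PySem.Set.ofList l) then true else false)
      = ((PySem.List.sorted l (fun x => x) false).zip
          (PySem.List.slice (PySem.List.sorted l (fun x => x) false) (some 1) none)).any
            (fun p => p.1 == p.2) := by
  set s := PySem.List.sorted l (fun x => x) false with hsdef
  have hperm : s.Perm l := PySem.List.sorted_perm l (fun x => x) false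
  have hpair : s.Pairwise (· ≤ ·) := by
    simpa using PySem.List.sorted_pairwise l (fun x => x)
  rw [PySem.List.slice_from_one]
  by_cases h : l.Nodup
  · have hlen : (PySem.Set.ofList l).length = l.length := (ofList_length_iff l).mpr h
    have hcond : ¬ (PySem.List.len l ≠ PySem.List.len (PySem.Set.ofList l)) := by
      simp [PySem.List.len_eq, hlen]
    have h2 : s.Nodup := hperm.nodup_iff.mpr h
    rw [if_neg hcond]
    exact ((adj_scan_sorted s hpair).mpr h2).symm
  · have h1 : PySem.List.len l ≠ PySem.List.len (PySem.Set.ofList l) := by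
      simp only [PySem.List.len_eq, ne_eq, Nat.cast_inj]
      intro hc
      exact h ((ofList_length_iff l).mp hc.symm)
    have h2 : ¬ s.Nodup := fun hn => h (hperm.nodup_iff.mp hn)
    have h3 : ((s.zip s.tail).any (fun p => p.1 == p.2)) = true := by
      by_contra hc
      exact h2 ((adj_scan_sorted s hpair).mp (Bool.not_eq_true _ ▸ eq_false_of_ne_true hc))
    rw [if_pos h1]
    exact h3.symm

-- ===== VERDICT (by name: the statement is the Claim_ definition above) =====
theorem nsInSameNetwork_spec : Claim_equal_nsInSameNetwork := by
  intro nslist _ _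
  unfold Spec_nsInSameNetwork nsInSameNetwork nsInSameNetwork_alt
  rw [show (fun (acc : List String) (ip : String) =>
        let net := pvSplitDot ip
        acc ++ [PySem.List.pyGetD net 0 "" ++ "." ++ PySem.List.pyGetD net 1 "" ++ "."
          ++ PySem.List.pyGetD net 2 ""]) = fun acc ip => acc ++ [pvPrefix3 ip] from rfl,
    PySem.List.foldl_append_singleton_eq_map]
  simp only [List.nil_append]
  exact dup_test_eq (nslist.map pvPrefix3)
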